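-- pv_equiv track=rewrite | github.com/gliboc/lz-compression | src/lempelziv.py | compress2
-- ===== SOURCE A (Python) =====
-- def compress2(word):
--     """Compress words as strings"""
--     phrases = set()
--     current_prefix = ""
--     nb_phrases = 0
--     for digit in word:
--
--         if current_prefix + digit in phrases:
--             current_prefix += digit
--
--         else:
--             phrases.add(current_prefix + digit)
--             nb_phrases += 1
--             current_prefix = ""
--
--     if current_prefix != "":
--         nb_phrases += 1
--
--     return nb_phrases
-- ===== SOURCE B (Python) =====
-- def compress2(word):
--     """Compress words as strings (LZ78 phrase count, phrase-at-a-time parse of a node-indexed trie)"""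
--     children = {0: {}}          # node id -> {char: child node id}
--     n = len(word)
--     count = 0
--     i = 0
--     while i < n:
--         v = 0
--         while i < n and word[i] in children[v]:
--             v = children[v][word[i]]
--             i += 1
--         if i == n:              # word ended inside an already-known phrase
--             return count + 1
--         new = len(children)
--         children[v][word[i]] = new
--         children[new] = {}
--         count += 1
--         i += 1
--     return count
-- ===== Notes on version B (the rewrite author's own statement) =====
-- stated objective: alternative
-- what changed: A's single character loop that grows a prefix string and tests it against a set of phrase strings is replaced by a phrase-at-a-time parse: an outer loop per phrase whose inner loop descends a node-indexed trie (dict node -> {char: child}) by single-character edges, early-returning on a trailing partial phrase; no strings are ever built or hashed.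
import Mathlib
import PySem

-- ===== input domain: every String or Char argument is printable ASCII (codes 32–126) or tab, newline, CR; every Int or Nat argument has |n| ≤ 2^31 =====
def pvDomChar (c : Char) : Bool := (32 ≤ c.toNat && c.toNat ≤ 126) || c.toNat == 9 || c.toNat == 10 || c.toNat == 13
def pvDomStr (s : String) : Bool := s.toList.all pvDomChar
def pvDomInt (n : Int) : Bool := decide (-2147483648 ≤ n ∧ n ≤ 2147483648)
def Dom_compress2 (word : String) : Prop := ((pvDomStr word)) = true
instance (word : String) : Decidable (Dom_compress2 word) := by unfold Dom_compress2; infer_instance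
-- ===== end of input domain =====

-- B replaces A's single char loop over a set of phrase strings by a phrase-at-a-time parse
-- descending a node-indexed trie of per-node child dicts; return values proved equal.

-- ===== PORT A =====
-- A's state: (phrases : set of strings as char lists, current_prefix, nb_phrases)
def stepA (st : PySem.Set (List Char) × List Char × Int) (c : Char) :
    PySem.Set (List Char) × List Char × Int :=
  if PySem.Set.contains st.1 (st.2.1 ++ [c]) then (st.1, st.2.1 ++ [c], st.2.2)
  else (PySem.Set.add st.1 (st.2.1 ++ [c]), [], st.2.2 + 1)

def compress2 (word : String) : Int :=
  let st := word.toList.foldl stepA (PySem.Set.empty, [], 0)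
  if st.2.1 ≠ [] then st.2.2 + 1 else st.2.2

-- ===== PORT B =====
-- B's inner loop: descend from node v while a child edge for the next character exists;
-- returns (last node reached, remaining characters).  children[v] in the Python is always
-- a present key; the port reads it totally with getD (the default branch is unreachable).
def descendB (ch : PySem.Dict Int (PySem.Dict Char Int)) (v : Int) :
    List Char → Int × List Char
  | [] => (v, [])
  | c :: cs =>
    match (PySem.Dict.getD ch v PySem.Dict.empty).get? c with
    | some w => descendB ch w cs
    | none => (v, c :: cs)

-- B's outer loop, one iteration per phrase.  The fuel argument (initially the word length)
-- only makes the recursion total: every phrase consumes at least one character, so the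
-- fuel-exhausted branch is unreachable.
def outerB (ch : PySem.Dict Int (PySem.Dict Char Int)) (nid count : Int) :
    Nat → List Char → Int
  | _, [] => count
  | 0, _ :: _ => count            -- unreachable fuel guard
  | fuel + 1, a :: l =>
    match descendB ch 0 (a :: l) with
    | (_, []) => count + 1        -- word ended inside an already-known phrase
    | (v, c :: cs) =>
        outerB ((ch.modify v PySem.Dict.empty (fun m => m.insert c nid)).insert nid
                  PySem.Dict.empty)
          (nid + 1) (count + 1) fuel cs

def compress2_alt (word : String) : Int :=
  outerB (PySem.Dict.empty.insert 0 PySem.Dict.empty) 1 0 word.toList.length word.toList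

-- ===== PRECONDITION & SPEC =====
def Spec_compress2 (word : String) (out : Int) : Prop := out = compress2_alt word
instance (word : String) (out : Int) : Decidable (Spec_compress2 word out) := by unfold Spec_compress2; infer_instance

-- ===== CLAIM (what is proved, stated in full; the proofs are below) =====
def Claim_equal_compress2 : Prop := ∀ (word : String), Dom_compress2 word → Spec_compress2 word (compress2 word)

-- ===== LEMMAS AND PROOFS =====

-- Proof-side intermediate: the same parse as a flat character-by-character fold over a
-- (node, char)-keyed edge dict.  A is related to this fold by the invariant LZInv below,
-- and the fold is then related to B's phrase-at-a-time recursion.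
def flatStep (st : PySem.Dict (Int × Char) Int × Int × Int × Int) (c : Char) :
    PySem.Dict (Int × Char) Int × Int × Int × Int :=
  match st.1.get? (st.2.2.1, c) with
  | some q => (st.1, st.2.1, q, st.2.2.2)
  | none => (st.1.insert (st.2.2.1, c) st.2.1, st.2.1 + 1, 0, st.2.2.2 + 1)

def flatCount (word : String) : Int :=
  let st := word.toList.foldl flatStep (PySem.Dict.empty, 1, 0, 0)
  if st.2.2.1 ≠ 0 then st.2.2.2 + 1 else st.2.2.2

-- walking the flat trie from node p along a list of characters
def walk (d : PySem.Dict (Int × Char) Int) (p : Int) : List Char → Option Int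
  | [] => some p
  | c :: cs =>
    match d.get? (p, c) with
    | some q => walk d q cs
    | none => none

-- the coupling invariant between A's state and the flat fold's state
def LZInv (S : PySem.Set (List Char)) (cur : List Char) (nbA : Int)
    (d : PySem.Dict (Int × Char) Int) (next node nbB : Int) : Prop :=
  nbA = nbB ∧ 0 ≤ nbB ∧ next = nbB + 1 ∧
  walk d 0 cur = some node ∧ 0 ≤ node ∧ node < next ∧
  (∀ s : List Char, s ∈ S ↔ s ≠ [] ∧ (walk d 0 s).isSome) ∧
  (∀ p c q, d.get? (p, c) = some q → 1 ≤ q ∧ q < next ∧ 0 ≤ p ∧ p < next) ∧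
  (∀ k k' q, d.get? k = some q → d.get? k' = some q → k = k')

theorem walk_append (d : PySem.Dict (Int × Char) Int) (p : Int) (s t : List Char) :
    walk d p (s ++ t) = (walk d p s).bind (fun q => walk d q t) := by
  induction s generalizing p with
  | nil => simp [walk]
  | cons c cs ih =>
    simp only [List.cons_append, walk]
    cases h : d.get? (p, c) with
    | none => simp
    | some q => simp [ih]

theorem walk_singleton (d : PySem.Dict (Int × Char) Int) (p : Int) (c : Char) :
    walk d p [c] = d.get? (p, c) := by
  simp only [walk]; cases d.get? (p, c) <;> simp

theorem walk_insert_of_none (d : PySem.Dict (Int × Char) Int) (k : Int × Char) (v : Int)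
    (hk : d.get? k = none) (s : List Char) (p q : Int) (h : walk d p s = some q) :
    walk (d.insert k v) p s = some q := by
  induction s generalizing p with
  | nil => exact h
  | cons c cs ih =>
    simp only [walk] at h ⊢
    cases hg : d.get? (p, c) with
    | none => simp [hg] at h
    | some r =>
      have hne : (p, c) ≠ k := by intro he; rw [he, hk] at hg; simp at hg
      rw [PySem.Dict.get?_insert_of_ne d v hne, hg]
      rw [hg] at h
      exact ih r h

theorem walk_last_step (d : PySem.Dict (Int × Char) Int) (s : List Char) (a : Char) (q : Int) :
    walk d 0 (s ++ [a]) = some q ↔ ∃ p, walk d 0 s = some p ∧ d.get? (p, a) = some q := by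
  rw [walk_append]
  cases h : walk d 0 s with
  | none => simp
  | some p => simp [walk_singleton]

-- with distinct edge values and all values ≥ 1, walk from the root is injective
theorem walk_inj (d : PySem.Dict (Int × Char) Int)
    (hval : ∀ p c q, d.get? (p, c) = some q → 1 ≤ q)
    (hinj : ∀ k k' q, d.get? k = some q → d.get? k' = some q → k = k') :
    ∀ (s t : List Char) (q : Int), walk d 0 s = some q → walk d 0 t = some q → s = t := by
  intro s
  induction s using List.reverseRecOn with
  | nil =>
    intro t q hs ht
    simp only [walk] at hs
    cases hs
    rcases t.eq_nil_or_concat with rfl | ⟨t1, b, rfl⟩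
    · rfl
    · rw [List.concat_eq_append, walk_last_step] at ht
      obtain ⟨p2, _, hge⟩ := ht
      have := hval p2 b 0 hge
      omega
  | append_singleton s1 a ih =>
    intro t q hs ht
    rw [walk_last_step] at hs
    obtain ⟨p1, hw1, hg1⟩ := hs
    rcases t.eq_nil_or_concat with rfl | ⟨t1, b, rfl⟩
    · simp only [walk] at ht
      cases ht
      have := hval p1 a 0 hg1
      omega
    · rw [List.concat_eq_append, walk_last_step] at ht
      obtain ⟨p2, hw2, hg2⟩ := ht
      have hkk := hinj (p1, a) (p2, b) q hg1 hg2
      injection hkk with hp' ha'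
      subst hp'; subst ha'
      rw [List.concat_eq_append, ih t1 p1 hw1 hw2]

-- no edges leave a node ≥ next (all first components are < next)
theorem walk_from_fresh (d : PySem.Dict (Int × Char) Int) (m : Int)
    (h : ∀ x, d.get? (m, x) = none) (s : List Char) (q : Int)
    (hw : walk d m s = some q) : s = [] ∧ q = m := by
  cases s with
  | nil => simp only [walk] at hw; cases hw; exact ⟨rfl, rfl⟩
  | cons c cs => simp [walk, h c] at hw

-- a successful walk of d' = d.insert (node,c) next either avoids the new edge or ends on it
theorem walk_insert_cases (d : PySem.Dict (Int × Char) Int) (node next : Int) (c : Char)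
    (hbound : ∀ p x q, d.get? (p, x) = some q → q < next ∧ p < next)
    (hnode : node < next) :
    ∀ (s : List Char) (p q : Int), p ≠ next →
      walk (d.insert (node, c) next) p s = some q →
      walk d p s = some q ∨ ∃ s1, walk d p s1 = some node ∧ s = s1 ++ [c] := by
  intro s
  induction s with
  | nil => intro p q _ h; exact Or.inl h
  | cons a as ih =>
    intro p q hp h
    have hfresh : ∀ x, (d.insert (node, c) next).get? (next, x) = none := by
      intro x
      have hne : ((next : Int), x) ≠ (node, c) := by
        intro he; injection he with h1 _; omega
      rw [PySem.Dict.get?_insert_of_ne d next hne]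
      cases hg : d.get? (next, x) with
      | none => rfl
      | some r => have := (hbound next x r hg).2; omega
    by_cases hk : ((p : Int), a) = ((node : Int), c)
    · injection hk with hk1 hk2
      subst hk1; subst hk2
      simp only [walk, PySem.Dict.get?_insert_self] at h
      obtain ⟨h1, h2⟩ := walk_from_fresh _ next hfresh as q h
      subst h1
      exact Or.inr ⟨[], rfl, rfl⟩
    · simp only [walk, PySem.Dict.get?_insert_of_ne d next hk] at h
      cases hg : d.get? (p, a) with
      | none => rw [hg] at h; exact absurd h (by simp)
      | some r =>
        rw [hg] at h
        have hr : r ≠ next := by have := (hbound p a r hg).1; omega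
        rcases ih r q hr h with hl | ⟨s1, hw1, hs⟩
        · exact Or.inl (by simp [walk, hg, hl])
        · exact Or.inr ⟨a :: s1, by simp [walk, hg, hw1], by rw [hs]; simp⟩

-- the invariant holds initially
theorem inv_init : LZInv PySem.Set.empty [] 0 PySem.Dict.empty 1 0 0 := by
  refine ⟨rfl, le_refl 0, rfl, rfl, le_refl 0, by norm_num, ?_, ?_, ?_⟩
  · intro s
    constructor
    · intro h; exact absurd h (by simp [PySem.Set.empty])
    · rintro ⟨hne, hw⟩
      cases s with
      | nil => exact absurd rfl hne
      | cons c cs => simp [walk, PySem.Dict.get?_empty] at hw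
  · intro p c q h; simp [PySem.Dict.get?_empty] at h
  · intro k k' q h; simp [PySem.Dict.get?_empty] at h

-- one loop step preserves the invariant
theorem inv_step (S : PySem.Set (List Char)) (cur : List Char) (nbA : Int)
    (d : PySem.Dict (Int × Char) Int) (next node nbB : Int) (c : Char)
    (h : LZInv S cur nbA d next node nbB) :
    LZInv (stepA (S, cur, nbA) c).1 (stepA (S, cur, nbA) c).2.1 (stepA (S, cur, nbA) c).2.2
        (flatStep (d, next, node, nbB) c).1 (flatStep (d, next, node, nbB) c).2.1
        (flatStep (d, next, node, nbB) c).2.2.1 (flatStep (d, next, node, nbB) c).2.2.2 := by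
  obtain ⟨hnb, hnb0, hnext, hwcur, hn0, hnlt, hmem, hbound, hinj⟩ := h
  have hwalk_ext : walk d 0 (cur ++ [c]) = d.get? (node, c) := by
    rw [walk_append, hwcur]; simp [walk_singleton]
  have hcond : PySem.Set.contains S (cur ++ [c]) = (d.get? (node, c)).isSome := by
    cases hg : d.get? (node, c) with
    | some q =>
      simp only [Option.isSome_some]
      rw [PySem.Set.contains_eq_listContains]
      simp only [List.contains_eq_mem, decide_eq_true_eq]
      rw [hmem]
      exact ⟨by simp, by rw [hwalk_ext, hg]; rfl⟩
    | none =>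
      simp only [Option.isSome_none]
      rw [PySem.Set.contains_eq_listContains]
      simp only [List.contains_eq_mem, decide_eq_false_iff_not]
      rw [hmem, hwalk_ext, hg]
      rintro ⟨_, h2⟩; exact absurd h2 (by simp)
  cases hg : d.get? (node, c) with
  | some q =>
    -- both take the "extend the prefix / follow the edge" branch
    have hc' : PySem.Set.contains S (cur ++ [c]) = true := by rw [hcond, hg]; rfl
    have hA : stepA (S, cur, nbA) c = (S, cur ++ [c], nbA) := by
      simp only [stepA]; rw [hc']; simp
    have hB : flatStep (d, next, node, nbB) c = (d, next, q, nbB) := by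
      simp [flatStep, hg]
    rw [hA, hB]
    dsimp only
    obtain ⟨hq1, hqlt, _, _⟩ := hbound node c q hg
    exact ⟨hnb, hnb0, hnext, by rw [hwalk_ext, hg], by omega, hqlt, hmem, hbound, hinj⟩
  | none =>
    -- both take the "new phrase / new trie node" branch
    have hc' : PySem.Set.contains S (cur ++ [c]) = false := by rw [hcond, hg]; rfl
    have hA : stepA (S, cur, nbA) c = (PySem.Set.add S (cur ++ [c]), [], nbA + 1) := by
      simp only [stepA]; rw [hc']; simp
    have hB : flatStep (d, next, node, nbB) c =
        (d.insert (node, c) next, next + 1, 0, nbB + 1) := by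
      simp [flatStep, hg]
    rw [hA, hB]
    dsimp only
    have hbound' : ∀ p x q, (d.insert (node, c) next).get? (p, x) = some q →
        1 ≤ q ∧ q < next + 1 ∧ 0 ≤ p ∧ p < next + 1 := by
      intro p x q hq
      by_cases hk : ((p : Int), x) = ((node : Int), c)
      · rw [hk, PySem.Dict.get?_insert_self] at hq
        injection hk with h1 _
        injection hq with h2
        omega
      · rw [PySem.Dict.get?_insert_of_ne d next hk] at hq
        have := hbound p x q hq
        omega
    refine ⟨by omega, by omega, by omega, rfl, le_refl 0, by omega, ?_, hbound', ?_⟩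
    · -- membership characterisation for the extended structures
      intro s
      rw [PySem.Set.mem_add]
      constructor
      · rintro (hs | rfl)
        · obtain ⟨hne, hw⟩ := (hmem s).mp hs
          refine ⟨hne, ?_⟩
          cases hws : walk d 0 s with
          | none => rw [hws] at hw; exact absurd hw (by simp)
          | some r =>
            rw [walk_insert_of_none d (node, c) next hg s 0 r hws]; rfl
        · refine ⟨by simp, ?_⟩
          have h1 : walk (d.insert (node, c) next) 0 cur = some node :=
            walk_insert_of_none d (node, c) next hg cur 0 node hwcur
          rw [walk_append, h1]
          simp only [Option.bind_some]
          rw [walk_singleton, PySem.Dict.get?_insert_self]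
          simp
      · rintro ⟨hne, hw⟩
        cases hws : walk (d.insert (node, c) next) 0 s with
        | none => rw [hws] at hw; exact absurd hw (by simp)
        | some r =>
          have hp0 : (0 : Int) ≠ next := by omega
          rcases walk_insert_cases d node next c
              (fun p x q hq => ⟨(hbound p x q hq).2.1, (hbound p x q hq).2.2.2⟩)
              hnlt s 0 r hp0 hws with hl | ⟨s1, hw1, rfl⟩
          · exact Or.inl ((hmem s).mpr ⟨hne, by rw [hl]; rfl⟩)
          · have : s1 = cur :=
              walk_inj d (fun p x q hq => (hbound p x q hq).1) hinj s1 cur node hw1 hwcur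
            exact Or.inr (by rw [this])
    · -- edge-value injectivity for the extended dict
      intro k k' q hk hk'
      by_cases h1 : k = ((node : Int), c) <;> by_cases h2 : k' = ((node : Int), c)
      · rw [h1, h2]
      · rw [h1, PySem.Dict.get?_insert_self] at hk
        rw [PySem.Dict.get?_insert_of_ne d next h2] at hk'
        injection hk with hk
        obtain ⟨p', x'⟩ := k'
        have := (hbound p' x' q hk').2.1
        omega
      · rw [h2, PySem.Dict.get?_insert_self] at hk'
        rw [PySem.Dict.get?_insert_of_ne d next h1] at hk
        injection hk' with hk'
        obtain ⟨p', x'⟩ := k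
        have := (hbound p' x' q hk).2.1
        omega
      · rw [PySem.Dict.get?_insert_of_ne d next h1] at hk
        rw [PySem.Dict.get?_insert_of_ne d next h2] at hk'
        exact hinj k k' q hk hk'

-- the invariant is preserved through the whole fold
theorem inv_fold (l : List Char) :
    ∀ (S : PySem.Set (List Char)) (cur : List Char) (nbA : Int)
      (d : PySem.Dict (Int × Char) Int) (next node nbB : Int),
      LZInv S cur nbA d next node nbB →
      LZInv (l.foldl stepA (S, cur, nbA)).1 (l.foldl stepA (S, cur, nbA)).2.1
          (l.foldl stepA (S, cur, nbA)).2.2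
          (l.foldl flatStep (d, next, node, nbB)).1 (l.foldl flatStep (d, next, node, nbB)).2.1
          (l.foldl flatStep (d, next, node, nbB)).2.2.1
          (l.foldl flatStep (d, next, node, nbB)).2.2.2 := by
  induction l with
  | nil => intro S cur nbA d next node nbB h; exact h
  | cons c cs ih =>
    intro S cur nbA d next node nbB h
    have hstep := inv_step S cur nbA d next node nbB c h
    simp only [List.foldl_cons]
    have hA : stepA (S, cur, nbA) c =
        ((stepA (S, cur, nbA) c).1, (stepA (S, cur, nbA) c).2.1, (stepA (S, cur, nbA) c).2.2) := rfl
    have hB : flatStep (d, next, node, nbB) c =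
        ((flatStep (d, next, node, nbB) c).1, (flatStep (d, next, node, nbB) c).2.1,
         (flatStep (d, next, node, nbB) c).2.2.1, (flatStep (d, next, node, nbB) c).2.2.2) := rfl
    rw [hA, hB]
    exact ih _ _ _ _ _ _ _ hstep

-- A equals the flat fold
theorem A_eq_flat (word : String) : compress2 word = flatCount word := by
  unfold compress2 flatCount
  have h := inv_fold word.toList PySem.Set.empty [] 0 PySem.Dict.empty 1 0 0 inv_init
  obtain ⟨hnb, _, _, hwcur, _, _, _, hbound, _⟩ := h
  set rA := word.toList.foldl stepA (PySem.Set.empty, [], 0) with hrA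
  set rB := word.toList.foldl flatStep (PySem.Dict.empty, 1, 0, 0) with hrB
  have hpos : ∀ (s : List Char) (p q : Int), walk rB.1 p s = some q →
      (s = [] ∧ q = p) ∨ 1 ≤ q := by
    intro s
    induction s with
    | nil => intro p q hw; simp only [walk] at hw; injection hw with hw; exact Or.inl ⟨rfl, hw.symm⟩
    | cons a as ih =>
      intro p q hw
      simp only [walk] at hw
      cases hg2 : rB.1.get? (p, a) with
      | none => rw [hg2] at hw; exact absurd hw (by simp)
      | some r2 =>
        rw [hg2] at hw
        rcases ih r2 q hw with ⟨_, rfl⟩ | h1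
        · exact Or.inr (hbound p a _ hg2).1
        · exact Or.inr h1
  have hcur : rA.2.1 = [] ↔ rB.2.2.1 = 0 := by
    constructor
    · intro he; rw [he] at hwcur; simp only [walk] at hwcur; injection hwcur with h'; omega
    · intro he
      rcases hpos rA.2.1 0 rB.2.2.1 hwcur with ⟨h1, _⟩ | h1
      · exact h1
      · omega
  by_cases he : rA.2.1 = []
  · simp [he, hcur.mp he, hnb]
  · have : rB.2.2.1 ≠ 0 := fun h0 => he (hcur.mpr h0)
    simp [he, this, hnb]

-- ===== bridge: the flat fold equals B's phrase-at-a-time recursion =====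

-- descending never lengthens the remaining word
theorem descendB_len (ch : PySem.Dict Int (PySem.Dict Char Int)) :
    ∀ (l : List Char) (v : Int), (descendB ch v l).2.length ≤ l.length := by
  intro l
  induction l with
  | nil => intro v; simp [descendB]
  | cons c cs ih =>
    intro v
    simp only [descendB]
    cases (PySem.Dict.getD ch v PySem.Dict.empty).get? c with
    | some w => exact le_trans (ih w) (by simp)
    | none => simp

-- the inner descent follows exactly the edges the flat fold follows
theorem descend_flat (ch : PySem.Dict Int (PySem.Dict Char Int))
    (d : PySem.Dict (Int × Char) Int) (next : Int)
    (hcorr : ∀ v c, (PySem.Dict.getD ch v PySem.Dict.empty).get? c = d.get? (v, c))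
    (hbd : ∀ v c w, d.get? (v, c) = some w → 1 ≤ w ∧ w < next ∧ 0 ≤ v ∧ v < next) :
    ∀ (l : List Char) (v : Int), 0 ≤ v → v < next →
      (∀ count : Int, List.foldl flatStep (d, next, v, count) l
          = List.foldl flatStep (d, next, (descendB ch v l).1, count) (descendB ch v l).2)
      ∧ 0 ≤ (descendB ch v l).1 ∧ (descendB ch v l).1 < next
      ∧ ((descendB ch v l).2 = l ∧ (descendB ch v l).1 = v ∨ 1 ≤ (descendB ch v l).1)
      ∧ (∀ c cs, (descendB ch v l).2 = c :: cs → d.get? ((descendB ch v l).1, c) = none) := by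
  intro l
  induction l with
  | nil =>
    intro v h0 h1
    refine ⟨fun count => rfl, h0, h1, Or.inl ⟨rfl, rfl⟩, ?_⟩
    intro c cs h; simp [descendB] at h
  | cons c cs ih =>
    intro v h0 h1
    cases hg : d.get? (v, c) with
    | some w =>
      have hdes : descendB ch v (c :: cs) = descendB ch w cs := by
        simp only [descendB]; rw [hcorr, hg]
      obtain ⟨hw1, hwlt, _, _⟩ := hbd v c w hg
      obtain ⟨hfold, hp0, hp1, hp2, hp3⟩ := ih w (by omega) hwlt
      rw [hdes]
      refine ⟨?_, hp0, hp1, ?_, hp3⟩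
      · intro count
        have hstep : flatStep (d, next, v, count) c = (d, next, w, count) := by
          simp [flatStep, hg]
        simp only [List.foldl_cons, hstep]
        exact hfold count
      · rcases hp2 with ⟨_, hh⟩ | hge
        · exact Or.inr (by rw [hh]; exact hw1)
        · exact Or.inr hge
    | none =>
      have hdes : descendB ch v (c :: cs) = (v, c :: cs) := by
        simp only [descendB]; rw [hcorr, hg]
      rw [hdes]
      refine ⟨fun count => rfl, h0, h1, Or.inl ⟨rfl, rfl⟩, ?_⟩
      intro c' cs' h
      injection h with h1' h2'
      subst h1'
      exact hg

-- the flat fold's final count equals B's outer recursion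
theorem bridge (fuel : Nat) :
    ∀ (l : List Char) (ch : PySem.Dict Int (PySem.Dict Char Int))
      (d : PySem.Dict (Int × Char) Int) (next count : Int),
      l.length ≤ fuel → 1 ≤ next →
      (∀ v c, (PySem.Dict.getD ch v PySem.Dict.empty).get? c = d.get? (v, c)) →
      (∀ v c w, d.get? (v, c) = some w → 1 ≤ w ∧ w < next ∧ 0 ≤ v ∧ v < next) →
      (let st := List.foldl flatStep (d, next, 0, count) l;
       if st.2.2.1 ≠ 0 then st.2.2.2 + 1 else st.2.2.2) = outerB ch next count fuel l := by
  induction fuel with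
  | zero =>
    intro l ch d next count hlen _ _ _
    have : l = [] := List.eq_nil_of_length_eq_zero (Nat.le_zero.mp hlen)
    subst this
    simp [outerB]
  | succ fuel ihf =>
    intro l ch d next count hlen hnext hcorr hbd
    cases l with
    | nil => simp [outerB]
    | cons a l' =>
      obtain ⟨hfold, hv0, hvlt, hv2, hv3⟩ :=
        descend_flat ch d next hcorr hbd (a :: l') 0 le_rfl (by omega)
      cases hdes : descendB ch 0 (a :: l') with
      | mk w rest =>
        rw [hdes] at hfold hv0 hvlt hv2 hv3
        cases rest with
        | nil =>
          -- word ended inside a known phrase: node w ≠ 0, both give count + 1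
          have hw1 : 1 ≤ w := by
            rcases hv2 with ⟨h1, _⟩ | h1
            · exact absurd h1 (by simp)
            · exact h1
          simp only [outerB, hdes]
          rw [hfold count]
          simp only [List.foldl_nil]
          have : w ≠ 0 := by omega
          simp [this]
        | cons c cs =>
          -- new phrase: both add the edge (w, c) ↦ next and continue on cs
          have hnone : d.get? (w, c) = none := hv3 c cs rfl
          have hstep : flatStep (d, next, w, count) c
              = (d.insert (w, c) next, next + 1, 0, count + 1) := by
            simp [flatStep, hnone]
          have hlen' : cs.length ≤ fuel := by
            have := descendB_len ch (a :: l') 0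
            rw [hdes] at this
            simp only [List.length_cons] at this hlen
            omega
          -- the nested-trie update matches the flat insert
          have hcorr' : ∀ v' c',
              (PySem.Dict.getD ((ch.modify w PySem.Dict.empty
                  (fun m => m.insert c next)).insert next PySem.Dict.empty) v'
                  PySem.Dict.empty).get? c'
              = (d.insert (w, c) next).get? (v', c') := by
            intro v' c'
            rw [PySem.Dict.getD_insert, PySem.Dict.getD_modify]
            by_cases hvn : v' = next
            · rw [if_pos hvn, PySem.Dict.get?_empty]
              have hne : ((v' : Int), c') ≠ (w, c) := by
                intro he; injection he with h1 _; omega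
              rw [PySem.Dict.get?_insert_of_ne d next hne]
              cases hg2 : d.get? (v', c') with
              | none => rfl
              | some r => have := (hbd v' c' r hg2).2.2.2; omega
            · rw [if_neg hvn]
              by_cases hvw : v' = w
              · rw [if_pos hvw]
                by_cases hcc : c' = c
                · rw [hcc, hvw, PySem.Dict.get?_insert_self, PySem.Dict.get?_insert_self]
                · have hne2 : ((v' : Int), c') ≠ (w, c) := by
                    intro he; injection he with _ h2; exact hcc h2
                  rw [PySem.Dict.get?_insert_of_ne _ next hcc,
                      PySem.Dict.get?_insert_of_ne d next hne2, hvw]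
                  exact hcorr w c'
              · rw [if_neg hvw]
                have hne2 : ((v' : Int), c') ≠ (w, c) := by
                  intro he; injection he with h1 _; exact hvw h1
                rw [PySem.Dict.get?_insert_of_ne d next hne2]
                exact hcorr v' c'
          have hbd' : ∀ v' c' w', (d.insert (w, c) next).get? (v', c') = some w' →
              1 ≤ w' ∧ w' < next + 1 ∧ 0 ≤ v' ∧ v' < next + 1 := by
            intro v' c' w' hq
            by_cases hk : ((v' : Int), c') = ((w : Int), c)
            · rw [hk, PySem.Dict.get?_insert_self] at hq
              injection hk with h1 _
              injection hq with h2
              omega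
            · rw [PySem.Dict.get?_insert_of_ne d next hk] at hq
              have := hbd v' c' w' hq
              omega
          have hrec := ihf cs _ (d.insert (w, c) next) (next + 1) (count + 1)
            hlen' (by omega) hcorr' hbd'
          simp only [outerB, hdes]
          rw [hfold count]
          simp only [List.foldl_cons, hstep]
          exact hrec

-- the flat fold equals B
theorem flat_eq_alt (word : String) : flatCount word = compress2_alt word := by
  unfold flatCount compress2_alt
  refine bridge word.toList.length word.toList _ _ 1 0 le_rfl le_rfl ?_ ?_
  · intro v c
    rw [PySem.Dict.getD_insert]
    by_cases h : v = 0 <;>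
      simp [h, PySem.Dict.get?_empty, PySem.Dict.getD_empty]
  · intro v c w h
    rw [PySem.Dict.get?_empty] at h
    exact absurd h (by simp)

-- ===== VERDICT (by name: the statement is the Claim_ definition above) =====
theorem compress2_spec : Claim_equal_compress2 := by
  intro word _
  unfold Spec_compress2
  rw [A_eq_flat, flat_eq_alt]
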